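-- pv_equiv track=rewrite | github.com/pranay-98/AI-uninformed_search_strategies | arrange_pichus.py | is_valid_column
-- ===== SOURCE A (Python) =====
-- def is_valid_column (house_map, row, column):
--
--     for i in range(row+1,len(house_map)):
--         if house_map[i][column] in "X@":
--             break
--         if house_map[i][column] in "p":
--             return False
--
--
--     for i in range(row-1,-1,-1):
--         if house_map[i][column] in "X@":
--             return True
--         if house_map[i][column] in "p":
--             return False
--
--     return True
-- ===== SOURCE B (Python) =====
-- def is_valid_column(house_map, row, column):
--     # Boundary arithmetic instead of directional scans: compute the nearest wall
--     # strictly above and strictly below `row` in the column, then test the whole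
--     # open interval between those walls (excluding `row` itself) for a pichu.
--     col = [line[column] for line in house_map]
--     walls = [i for i, c in enumerate(col) if c in "X@"]
--     above = max([i for i in walls if i < row], default=-1)
--     below = min([i for i in walls if i > row], default=len(col))
--     return not any(col[i] == "p" for i in range(above + 1, below) if i != row)
-- ===== Notes on version B (the rewrite author's own statement) =====
-- stated objective: alternative
-- what changed: Replaces A's two directional early-exit scans by boundary arithmetic: B materialises the column, computes the nearest wall index strictly above and strictly below the row (max/min over the wall-index list), and tests the open interval between them (minus the row itself) for a pichu.
-- outside the precondition, e.g. on is_valid_column(['X@', 'X', '', 'p@pp@@ppp'], -2, 2): A returns False, B raises IndexError; on is_valid_column(['X', ''], -1, 0): A returns True, B raises IndexError; on is_valid_column(['X', 'X'], -3, 0): A returns True, B returns True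
import Mathlib
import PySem

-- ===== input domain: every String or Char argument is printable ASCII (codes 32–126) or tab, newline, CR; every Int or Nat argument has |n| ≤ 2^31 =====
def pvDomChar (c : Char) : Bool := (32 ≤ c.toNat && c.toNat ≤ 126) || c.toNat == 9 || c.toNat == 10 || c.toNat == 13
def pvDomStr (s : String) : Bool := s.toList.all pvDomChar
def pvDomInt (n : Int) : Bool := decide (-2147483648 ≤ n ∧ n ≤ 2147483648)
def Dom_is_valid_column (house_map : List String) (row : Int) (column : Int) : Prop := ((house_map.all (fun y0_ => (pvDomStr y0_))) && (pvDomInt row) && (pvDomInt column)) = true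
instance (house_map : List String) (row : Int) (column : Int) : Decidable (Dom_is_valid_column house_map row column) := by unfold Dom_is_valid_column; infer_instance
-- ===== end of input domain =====

-- B replaces A's two directional early-exit scans by boundary arithmetic: it builds the column,
-- computes the nearest wall index strictly above and strictly below the row, and tests the open
-- interval between those walls (minus the row itself) for a pichu (objective: alternative).

-- ===== PORT A =====
-- shared indexing helper: house_map[i][column] (none = IndexError)
def pvCell (house_map : List String) (column i : Int) : Option Char :=
  (PySem.List.pyGet? house_map i).bind fun s => PySem.Str.pyGet? s column

-- second loop of A: 'for i in range(row-1,-1,-1): …; return True'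
def pvLoopUp (house_map : List String) (column : Int) : List Int → Bool
  | [] => true
  | i :: rest =>
    match pvCell house_map column i with
    | none => false   -- Python raises here; excluded by Pre_
    | some c =>
      if c = 'X' ∨ c = '@' then true
      else if c = 'p' then false
      else pvLoopUp house_map column rest

-- first loop of A: break falls through to the second loop
def pvLoopDown (house_map : List String) (column : Int) (up : List Int) : List Int → Bool
  | [] => pvLoopUp house_map column up
  | i :: rest =>
    match pvCell house_map column i with
    | none => false   -- Python raises here; excluded by Pre_
    | some c =>
      if c = 'X' ∨ c = '@' then pvLoopUp house_map column up
      else if c = 'p' then false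
      else pvLoopDown house_map column up rest

def is_valid_column (house_map : List String) (row : Int) (column : Int) : Bool :=
  pvLoopDown house_map column (PySem.List.pyRange (row - 1) (-1) (-1))
    (PySem.List.pyRange (row + 1) house_map.length 1)

-- ===== PORT B =====
def pvIsWall (c : Char) : Bool := c == 'X' || c == '@'

-- 'col = [line[column] for line in house_map]' — none = IndexError on some line
def is_valid_column_alt (house_map : List String) (row : Int) (column : Int) : Bool :=
  match house_map.mapM (fun s => PySem.Str.pyGet? s column) with
  | none => false   -- Python B raises IndexError here; excluded by Pre_
  | some col =>
    -- walls = [i for i, c in enumerate(col) if c in "X@"]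
    let walls : List Int := ((PySem.List.enumerate col 0).filter (fun p => pvIsWall p.2)).map (·.1)
    -- max(…, default=-1): fold of max with init -1 (exact: all wall indices are ≥ 0)
    let above : Int := (walls.filter (fun i => i < row)).foldl max (-1)
    -- min(…, default=len(col)): fold of min with init len (exact: all wall indices are < len)
    let below : Int := (walls.filter (fun i => row < i)).foldl min (col.length : Int)
    -- not any(col[i] == "p" for i in range(above+1, below) if i != row); indices are in range here
    !(((PySem.List.pyRange (above + 1) below 1).filter (fun i => i ≠ row)).any
        (fun i => PySem.List.pyGetD col i ' ' == 'p'))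

-- ===== PRECONDITION & SPEC =====
-- Pre_ excludes inputs on which some accessed cell house_map[i][column] raises IndexError, and —
-- slightly more broadly, stated closed-form — inputs where row escapes [-1, len] or column is an
-- invalid index for SOME row (A can still return there when negative-index wraparound or a wall/
-- pichu cuts the scan short of the bad access; see the cited excluded examples).
def Pre_is_valid_column (house_map : List String) (row : Int) (column : Int) : Prop :=
  (-1 ≤ row ∧ row ≤ house_map.length) ∧
  ∀ s ∈ house_map, PySem.Raise.InRange s.toList.length column

instance (house_map : List String) (row : Int) (column : Int) : Decidable (Pre_is_valid_column house_map row column) := by unfold Pre_is_valid_column; infer_instance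

def pvWitness_is_valid_column : List String × Int × Int := (["..", ".p"], 0, 0)

def Spec_is_valid_column (house_map : List String) (row : Int) (column : Int) (out : Bool) : Prop := out = is_valid_column_alt house_map row column
instance (house_map : List String) (row : Int) (column : Int) (out : Bool) : Decidable (Spec_is_valid_column house_map row column out) := by unfold Spec_is_valid_column; infer_instance

-- ===== CLAIM (what is proved, stated in full; the proofs are below) =====
def Claim_equal_is_valid_column : Prop := ∀ (house_map : List String) (row : Int) (column : Int), Dom_is_valid_column house_map row column → Pre_is_valid_column house_map row column → Spec_is_valid_column house_map row column (is_valid_column house_map row column)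

-- ===== LEMMAS AND PROOFS =====

-- abbreviations over the materialised column
def pvW (col : List Char) (i : Int) : Prop := pvIsWall (PySem.List.pyGetD col i ' ') = true
def pvP (col : List Char) (i : Int) : Prop := PySem.List.pyGetD col i ' ' = 'p'

lemma pvW_not_p {col : List Char} {i : Int} (h : pvW col i) : ¬ pvP col i := by
  unfold pvW pvIsWall at h
  unfold pvP
  intro hp
  rw [hp] at h
  simp at h

-- mapM over Option: length and pointwise characterisation
lemma pv_mapM_length {α β : Type} (f : α → Option β) :
    ∀ (l : List α) (col : List β), l.mapM f = some col → col.length = l.length := by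
  intro l
  induction l with
  | nil => intro col h; simp [List.mapM_nil] at h; simp [← h]
  | cons x xs ih =>
    intro col h
    rw [List.mapM_cons] at h
    cases hx : f x with
    | none => simp [hx] at h
    | some b =>
      simp only [hx, Option.bind_eq_bind, Option.bind_some] at h
      cases hxs : xs.mapM f with
      | none => simp [hxs] at h
      | some cs =>
        simp only [hxs, Option.bind_some, Option.pure_def, Option.some.injEq] at h
        subst h
        simp [ih cs hxs]

lemma pv_mapM_get {α β : Type} (f : α → Option β) :
    ∀ (l : List α) (col : List β), l.mapM f = some col →
      ∀ (k : Nat) (h1 : k < l.length) (h2 : k < col.length), f l[k] = some col[k] := by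
  intro l
  induction l with
  | nil => intro col h k h1 h2; simp at h1
  | cons x xs ih =>
    intro col h k h1 h2
    rw [List.mapM_cons] at h
    cases hx : f x with
    | none => simp [hx] at h
    | some b =>
      simp only [hx, Option.bind_eq_bind, Option.bind_some] at h
      cases hxs : xs.mapM f with
      | none => simp [hxs] at h
      | some cs =>
        simp only [hxs, Option.bind_some, Option.pure_def, Option.some.injEq] at h
        subst h
        cases k with
        | zero => simpa using hx
        | succ j =>
          simp only [List.getElem_cons_succ]
          exact ih cs hxs j (by simpa using h1) (by simpa using h2)

lemma pv_mapM_some {α β : Type} (f : α → Option β) :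
    ∀ (l : List α), (∀ a ∈ l, (f a).isSome) → ∃ col, l.mapM f = some col := by
  intro l
  induction l with
  | nil => intro _; exact ⟨[], by simp [List.mapM_nil]⟩
  | cons x xs ih =>
    intro h
    obtain ⟨b, hb⟩ := Option.isSome_iff_exists.mp (h x (by simp))
    obtain ⟨cs, hcs⟩ := ih (fun a ha => h a (by simp [ha]))
    exact ⟨b :: cs, by rw [List.mapM_cons, hb, hcs]; rfl⟩

-- foldl max / min characterisations
lemma pv_foldl_max_spec (l : List Int) :
    ∀ b : Int, b ≤ l.foldl max b ∧ (∀ x ∈ l, x ≤ l.foldl max b) ∧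
      (l.foldl max b = b ∨ l.foldl max b ∈ l) := by
  induction l with
  | nil => intro b; simp
  | cons x xs ih =>
    intro b
    obtain ⟨h1, h2, h3⟩ := ih (max b x)
    refine ⟨le_trans (le_max_left _ _) h1, ?_, ?_⟩
    · intro y hy
      rcases List.mem_cons.mp hy with h | h
      · subst h; exact le_trans (le_max_right _ _) h1
      · exact h2 y h
    · rcases h3 with h | h
      · rcases max_choice b x with hm | hm
        · left; simp only [List.foldl_cons]; omega
        · right; simp only [List.foldl_cons]; rw [h, hm]; simp
      · right; simp only [List.foldl_cons]; exact List.mem_cons_of_mem _ h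

lemma pv_foldl_min_spec (l : List Int) :
    ∀ b : Int, l.foldl min b ≤ b ∧ (∀ x ∈ l, l.foldl min b ≤ x) ∧
      (l.foldl min b = b ∨ l.foldl min b ∈ l) := by
  induction l with
  | nil => intro b; simp
  | cons x xs ih =>
    intro b
    obtain ⟨h1, h2, h3⟩ := ih (min b x)
    refine ⟨le_trans h1 (min_le_left _ _), ?_, ?_⟩
    · intro y hy
      rcases List.mem_cons.mp hy with h | h
      · subst h; exact le_trans h1 (min_le_right _ _)
      · exact h2 y h
    · rcases h3 with h | h
      · rcases min_choice b x with hm | hm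
        · left; simp only [List.foldl_cons]; omega
        · right; simp only [List.foldl_cons]; rw [h, hm]; simp
      · right; simp only [List.foldl_cons]; exact List.mem_cons_of_mem _ h

-- membership in B's wall-index list
lemma pv_mem_walls (col : List Char) (i : Int) :
    i ∈ ((PySem.List.enumerate col 0).filter (fun p => pvIsWall p.2)).map (·.1) ↔
      0 ≤ i ∧ i < (col.length : Int) ∧ pvW col i := by
  simp only [List.mem_map, List.mem_filter]
  constructor
  · rintro ⟨⟨j, c⟩, ⟨hmem, hw⟩, rfl⟩
    obtain ⟨k, hk, hp⟩ := (PySem.List.mem_enumerate_iff _ _ _).mp hmem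
    rw [Prod.mk.injEq] at hp
    obtain ⟨hj, hc⟩ := hp
    subst hj
    refine ⟨by omega, by simpa using hk, ?_⟩
    unfold pvW
    rw [PySem.List.pyGetD_eq_getElem col ' ' (by omega) (by simpa using hk)]
    simpa [hc] using hw
  · rintro ⟨h0, hn, hw⟩
    refine ⟨(i, PySem.List.pyGetD col i ' '), ⟨?_, hw⟩, rfl⟩
    rw [PySem.List.mem_enumerate_iff]
    refine ⟨i.toNat, by omega, ?_⟩
    rw [PySem.List.pyGetD_eq_getElem col ' ' h0 hn]
    have hI : (0:Int) + (i.toNat : Int) = i := by omega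
    rw [hI]

-- cells of the map agree with the materialised column
lemma pv_cell_eq (house_map : List String) (column : Int) (col : List Char)
    (hcol : house_map.mapM (fun s => PySem.Str.pyGet? s column) = some col)
    (i : Int) (h0 : 0 ≤ i) (h1 : i < (house_map.length : Int)) :
    pvCell house_map column i = some (PySem.List.pyGetD col i ' ') := by
  have hlen := pv_mapM_length _ house_map col hcol
  unfold pvCell
  rw [PySem.List.pyGet?_eq_some_getElem house_map h0 (by exact_mod_cast h1)]
  simp only [Option.bind_some]
  have hk : i.toNat < house_map.length := by omega
  have := pv_mapM_get _ house_map col hcol i.toNat hk (by omega)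
  rw [this, PySem.List.pyGetD_eq_getElem col ' ' h0 (by omega)]

-- A's second loop: true ↔ no pichu before the first wall, scanning a, a-1, …, 0
lemma pv_up_char (house_map : List String) (column : Int) (col : List Char)
    (hcol : house_map.mapM (fun s => PySem.Str.pyGet? s column) = some col) :
    ∀ (k : Nat) (a : Int), (a + 1).toNat ≤ k → a < (house_map.length : Int) →
      (pvLoopUp house_map column (PySem.List.pyRange a (-1) (-1)) = true ↔
        ∀ i : Int, 0 ≤ i → i ≤ a →
          (∀ j : Int, i < j → j ≤ a → ¬ pvW col j) → ¬ pvP col i) := by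
  intro k
  induction k with
  | zero =>
    intro a hk ha
    have hneg : a < 0 := by omega
    rw [PySem.List.pyRange_neg_one_eq_nil (by omega)]
    constructor
    · intro _ i h0 h1 _; omega
    · intro _; simp [pvLoopUp]
  | succ m ih =>
    intro a hk ha
    by_cases hneg : a < 0
    · rw [PySem.List.pyRange_neg_one_eq_nil (by omega)]
      constructor
      · intro _ i h0 h1 _; omega
      · intro _; simp [pvLoopUp]
    · push_neg at hneg
      rw [PySem.List.pyRange_neg_one_cons (by omega)]
      have hc := pv_cell_eq house_map column col hcol a hneg ha
      simp only [pvLoopUp, hc]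
      set c := PySem.List.pyGetD col a ' ' with hcdef
      by_cases hw : c = 'X' ∨ c = '@'
      · rw [if_pos hw]
        have hWa : pvW col a := by
          unfold pvW pvIsWall; rcases hw with h | h <;> rw [← hcdef, h] <;> rfl
        constructor
        · intro _ i h0 h1 hnw
          by_cases hia : i = a
          · subst hia; exact pvW_not_p hWa
          · exact absurd hWa (hnw a (by omega) (by omega))
        · intro _; rfl
      · rw [if_neg hw]
        by_cases hp : c = 'p'
        · rw [if_pos hp]
          constructor
          · intro h; simp at h
          · intro hall
            exfalso
            exact hall a hneg (by omega) (fun j hj1 hj2 => by omega) (by unfold pvP; rw [← hcdef]; exact hp)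
        · rw [if_neg hp]
          have hWa : ¬ pvW col a := by
            unfold pvW pvIsWall
            rw [← hcdef]
            simp only [Bool.or_eq_true, beq_iff_eq]
            push_neg at hw ⊢
            exact hw
          have hPa : ¬ pvP col a := by unfold pvP; rw [← hcdef]; exact hp
          rw [ih (a - 1) (by omega) (by omega)]
          constructor
          · intro hrec i h0 h1 hnw
            by_cases hia : i = a
            · subst hia; exact hPa
            · exact hrec i h0 (by omega) (fun j hj1 hj2 => hnw j hj1 (by omega))
          · intro hall i h0 h1 hnw
            refine hall i h0 (by omega) ?_
            intro j hj1 hj2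
            by_cases hja : j = a
            · subst hja; exact hWa
            · exact hnw j hj1 (by omega)

-- A's first loop: true ↔ (no pichu before the first wall going down) and the up loop succeeds
lemma pv_down_char (house_map : List String) (column : Int) (col : List Char)
    (hcol : house_map.mapM (fun s => PySem.Str.pyGet? s column) = some col) (up : List Int) :
    ∀ (k : Nat) (a : Int), ((house_map.length : Int) - a).toNat ≤ k → 0 ≤ a →
      (pvLoopDown house_map column up (PySem.List.pyRange a house_map.length 1) = true ↔
        ((∀ i : Int, a ≤ i → i < (house_map.length : Int) →
          (∀ j : Int, a ≤ j → j < i → ¬ pvW col j) → ¬ pvP col i) ∧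
         pvLoopUp house_map column up = true)) := by
  intro k
  induction k with
  | zero =>
    intro a hk h0
    rw [PySem.List.pyRange_one_eq_nil (by omega)]
    constructor
    · intro h; exact ⟨fun i h1 h2 _ => by omega, by simpa [pvLoopDown] using h⟩
    · intro ⟨_, h⟩; simpa [pvLoopDown] using h
  | succ m ih =>
    intro a hk h0
    by_cases hend : (house_map.length : Int) ≤ a
    · rw [PySem.List.pyRange_one_eq_nil hend]
      constructor
      · intro h; exact ⟨fun i h1 h2 _ => by omega, by simpa [pvLoopDown] using h⟩
      · intro ⟨_, h⟩; simpa [pvLoopDown] using h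
    · push_neg at hend
      rw [PySem.List.pyRange_one_cons hend]
      have hc := pv_cell_eq house_map column col hcol a h0 hend
      simp only [pvLoopDown, hc]
      set c := PySem.List.pyGetD col a ' ' with hcdef
      by_cases hw : c = 'X' ∨ c = '@'
      · rw [if_pos hw]
        have hWa : pvW col a := by
          unfold pvW pvIsWall; rcases hw with h | h <;> rw [← hcdef, h] <;> rfl
        constructor
        · intro h
          refine ⟨?_, h⟩
          intro i h1 h2 hnw
          by_cases hia : i = a
          · subst hia; exact pvW_not_p hWa
          · exact absurd hWa (hnw a (by omega) (by omega))
        · intro ⟨_, h⟩; exact h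
      · rw [if_neg hw]
        by_cases hp : c = 'p'
        · rw [if_pos hp]
          constructor
          · intro h; simp at h
          · intro ⟨hall, _⟩
            exfalso
            exact hall a (by omega) hend (fun j hj1 hj2 => by omega) (by unfold pvP; rw [← hcdef]; exact hp)
        · rw [if_neg hp]
          have hWa : ¬ pvW col a := by
            unfold pvW pvIsWall
            rw [← hcdef]
            simp only [Bool.or_eq_true, beq_iff_eq]
            push_neg at hw ⊢
            exact hw
          have hPa : ¬ pvP col a := by unfold pvP; rw [← hcdef]; exact hp
          rw [ih (a + 1) (by omega) (by omega)]
          constructor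
          · intro ⟨hrec, hu⟩
            refine ⟨?_, hu⟩
            intro i h1 h2 hnw
            by_cases hia : i = a
            · subst hia; exact hPa
            · exact hrec i (by omega) h2 (fun j hj1 hj2 => hnw j (by omega) hj2)
          · intro ⟨hall, hu⟩
            refine ⟨?_, hu⟩
            intro i h1 h2 hnw
            refine hall i (by omega) h2 ?_
            intro j hj1 hj2
            by_cases hja : j = a
            · subst hja; exact hWa
            · exact hnw j (by omega) hj2

-- B's result: true ↔ no pichu strictly between the nearest walls (row itself excluded)
lemma pv_alt_char (house_map : List String) (row column : Int) (col : List Char)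
    (hcol : house_map.mapM (fun s => PySem.Str.pyGet? s column) = some col) :
    (is_valid_column_alt house_map row column = true ↔
      ∀ i : Int,
        ((((PySem.List.enumerate col 0).filter (fun p => pvIsWall p.2)).map (·.1)).filter
            (fun i => i < row)).foldl max (-1) < i →
        i < ((((PySem.List.enumerate col 0).filter (fun p => pvIsWall p.2)).map (·.1)).filter
            (fun i => row < i)).foldl min (col.length : Int) →
        i ≠ row → ¬ pvP col i) := by
  unfold is_valid_column_alt
  rw [hcol]
  simp only [Bool.not_eq_true', List.any_eq_false, List.mem_filter, PySem.List.mem_pyRange_one,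
    ne_eq, decide_eq_true_eq]
  constructor
  · intro h i h1 h2 hne
    have := h i ⟨⟨by omega, h2⟩, hne⟩
    unfold pvP
    simpa using this
  · intro h i ⟨⟨h1, h2⟩, hne⟩
    have := h i (by omega) h2 hne
    unfold pvP at this
    simpa using this

-- ===== VERDICT (by name: the statement is the Claim_ definition above) =====
theorem is_valid_column_spec : Claim_equal_is_valid_column := by
  intro house_map row column _ hpre
  obtain ⟨⟨hr1, hr2⟩, hcolok⟩ := hpre
  -- the column materialises under Pre_
  obtain ⟨col, hcol⟩ := pv_mapM_some (fun s => PySem.Str.pyGet? s column) house_map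
    (by
      intro s hs
      rw [Option.isSome_iff_ne_none]
      intro hg
      have : ¬ PySem.Raise.InRange s.toList.length column := by
        rw [← PySem.List.pyGet?_eq_none_iff]
        simpa [PySem.Str.pyGet?] using hg
      exact this (hcolok s hs))
  have hlen : col.length = house_map.length := pv_mapM_length _ house_map col hcol
  unfold Spec_is_valid_column
  rw [Bool.eq_iff_iff]
  unfold is_valid_column
  rw [pv_down_char house_map column col hcol _ ((house_map.length : Int) - (row + 1)).toNat
      (row + 1) (by omega) (by omega),
    pv_up_char house_map column col hcol (row - 1 + 1).toNat (row - 1) (by omega) (by omega),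
    pv_alt_char house_map row column col hcol]
  -- boundary facts
  set walls := (((PySem.List.enumerate col 0).filter (fun p => pvIsWall p.2)).map (·.1)) with hwalls
  set above := (walls.filter (fun i => i < row)).foldl max (-1) with habove
  set below := (walls.filter (fun i => row < i)).foldl min (col.length : Int) with hbelow
  have hmemw : ∀ i : Int, i ∈ walls ↔ 0 ≤ i ∧ i < (col.length : Int) ∧ pvW col i := by
    intro i; rw [hwalls]; exact pv_mem_walls col i
  obtain ⟨ha1, ha2, ha3⟩ := pv_foldl_max_spec (walls.filter (fun i => i < row)) (-1)
  obtain ⟨hb1, hb2, hb3⟩ := pv_foldl_min_spec (walls.filter (fun i => row < i)) (col.length : Int)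
  rw [← habove] at ha1 ha2 ha3
  rw [← hbelow] at hb1 hb2 hb3
  have ha2' : ∀ j : Int, 0 ≤ j → j < (col.length : Int) → pvW col j → j < row → j ≤ above := by
    intro j hj0 hj1 hjw hjr
    exact ha2 j (List.mem_filter.mpr ⟨(hmemw j).mpr ⟨hj0, hj1, hjw⟩, by simpa using hjr⟩)
  have hb2' : ∀ j : Int, 0 ≤ j → j < (col.length : Int) → pvW col j → row < j → below ≤ j := by
    intro j hj0 hj1 hjw hjr
    exact hb2 j (List.mem_filter.mpr ⟨(hmemw j).mpr ⟨hj0, hj1, hjw⟩, by simpa using hjr⟩)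
  have ha3' : above = -1 ∨ (0 ≤ above ∧ above < (col.length : Int) ∧ pvW col above ∧ above < row) := by
    rcases ha3 with h | h
    · left; exact h
    · right
      obtain ⟨hm, hlt⟩ := List.mem_filter.mp h
      obtain ⟨x1, x2, x3⟩ := (hmemw above).mp hm
      exact ⟨x1, x2, x3, by simpa using hlt⟩
  have hb3' : below = (col.length : Int) ∨
      (0 ≤ below ∧ below < (col.length : Int) ∧ pvW col below ∧ row < below) := by
    rcases hb3 with h | h
    · left; exact h
    · right
      obtain ⟨hm, hlt⟩ := List.mem_filter.mp h
      obtain ⟨x1, x2, x3⟩ := (hmemw below).mp hm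
      exact ⟨x1, x2, x3, by simpa using hlt⟩
  have hn : (col.length : Int) = (house_map.length : Int) := by exact_mod_cast hlen
  constructor
  · -- A's two scan conditions imply B's interval condition
    intro ⟨hdown, hup⟩ i hia hib hir
    rcases lt_or_gt_of_ne hir with hlt | hgt
    · -- i < row : use the up condition
      refine hup i (by rcases ha3' with h | h <;> omega) (by omega) ?_
      intro j hj1 hj2
      intro hjw
      have : j ≤ above := ha2' j (by omega) (by omega) hjw (by omega)
      omega
    · -- row < i : use the down condition
      refine hdown i (by omega) (by omega) ?_
      intro j hj1 hj2
      intro hjw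
      have : below ≤ j := hb2' j (by omega) (by omega) hjw (by omega)
      omega
  · -- B's interval condition implies A's two scan conditions
    intro hB
    constructor
    · intro i h1 h2 hnw
      by_cases hiw : pvW col i
      · exact pvW_not_p hiw
      · have hib : i < below := by
          rcases hb3' with h | h
          · omega
          · by_cases hbi : below < i
            · exact absurd h.2.2.1 (hnw below (by omega) (by omega))
            · by_cases hbe : below = i
              · exact absurd (hbe ▸ h.2.2.1) hiw
              · omega
        exact hB i (by rcases ha3' with h | h <;> omega) hib (by omega)
    · intro i h1 h2 hnw
      by_cases hiw : pvW col i
      · exact pvW_not_p hiw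
      · have hia : above < i := by
          rcases ha3' with h | h
          · omega
          · by_cases hai : i < above
            · exact absurd h.2.2.1 (hnw above (by omega) (by omega))
            · by_cases hae : above = i
              · exact absurd (hae ▸ h.2.2.1) hiw
              · omega
        exact hB i hia (by omega) (by omega)
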